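-- pv_equiv track=rewrite | github.com/ryanescue/PDF-Tool-Kit | pdf_toolkit/services/table_exporter.py | _merge_header_rows
-- ===== SOURCE A (Python) =====
-- from typing import Iterable, List, Optional, Sequence, Tuple
--
-- def _clean_cell(value: Optional[str]) -> str:
--     if value is None:
--         return ""
--     return str(value).replace("\n", " ").strip()
--
-- def _merge_header_rows(rows: Sequence[Sequence[str]]) -> List[str]:
--     if not rows:
--         return []
--     width = max(len(row) for row in rows)
--     merged: List[str] = []
--     for col in range(width):
--         parts = []
--         for row in rows:
--             cell = row[col] if col < len(row) else ""
--             cell = _clean_cell(cell)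
--             if cell:
--                 parts.append(cell)
--         merged.append(" ".join(parts).strip())
--     return merged
-- ===== SOURCE B (Python) =====
-- from typing import Iterable, List, Optional, Sequence, Tuple
--
-- def _clean_cell(value: Optional[str]) -> str:
--     if value is None:
--         return ""
--     return str(value).replace("\n", " ").strip()
--
-- def _merge_header_rows(rows: Sequence[Sequence[str]]) -> List[str]:
--     # Transpose head-by-head: peel the first cell of every row (empty rows
--     # contribute "") until every row is exhausted; no index arithmetic needed.
--     merged: List[str] = []
--     while any(rows):
--         column = [row[0] if row else "" for row in rows]
--         rows = [row[1:] for row in rows]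
--         parts = [c for c in (_clean_cell(cell) for cell in column) if c]
--         merged.append(" ".join(parts).strip())
--     return merged
-- ===== Notes on version B (the rewrite author's own statement) =====
-- stated objective: alternative
-- what changed: Replaces the width computation (max of row lengths) and the col-indexed nested loops with a head/tail transposition: a while-loop peels the first cell of every row (empty rows contribute "") until all rows are exhausted, so the bounds check col < len(row) and the index arithmetic disappear.
import Mathlib
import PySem

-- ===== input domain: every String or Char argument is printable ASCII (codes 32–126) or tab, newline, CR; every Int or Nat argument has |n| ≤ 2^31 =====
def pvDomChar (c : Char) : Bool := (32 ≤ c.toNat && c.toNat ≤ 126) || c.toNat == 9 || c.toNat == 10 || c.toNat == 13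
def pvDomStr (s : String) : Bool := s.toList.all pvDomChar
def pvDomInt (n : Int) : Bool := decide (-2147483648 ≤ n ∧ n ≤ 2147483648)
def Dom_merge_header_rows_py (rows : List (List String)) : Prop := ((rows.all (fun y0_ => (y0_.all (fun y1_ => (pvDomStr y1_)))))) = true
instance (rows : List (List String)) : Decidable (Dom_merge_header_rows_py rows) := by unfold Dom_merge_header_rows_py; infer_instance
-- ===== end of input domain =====

-- B replaces A's max-width/indexed column loop by a head/tail transposition (same cost, no index arithmetic).

-- ===== PORT A =====
-- _clean_cell on an actual str (the None branch is unreachable for List String inputs)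
def cleanCell (s : String) : String :=
  PySem.Str.strip (PySem.Str.replace s "\n" " ")

def merge_header_rows_py (rows : List (List String)) : List String :=
  if rows.isEmpty then []
  else
    let width := (PySem.List.max? (rows.map (fun row => row.length)) (fun x => x)).getD 0
    (List.range width).map (fun col =>
      let parts := rows.foldl (fun parts row =>
        let cell := if col < row.length then row.getD col "" else ""
        let cell := cleanCell cell
        if cell ≠ "" then parts ++ [cell] else parts) ([] : List String)
      PySem.Str.strip (PySem.Str.join " " parts))

-- ===== PORT B =====
-- termination measure lemma for the while-loop (total cell count strictly drops)
theorem pv_sum_tail_lt (rows : List (List String))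
    (h : rows.any (fun r => !r.isEmpty) = true) :
    ((rows.map (fun row => row.tail)).map List.length).sum < (rows.map List.length).sum := by
  induction rows with
  | nil => simp at h
  | cons r rs ih =>
    simp only [List.any_cons, Bool.or_eq_true] at h
    rcases h with h | h
    · have hr : r ≠ [] := by cases r <;> simp_all
      have hle : ((rs.map (fun row => row.tail)).map List.length).sum ≤ (rs.map List.length).sum := by
        simp only [List.map_map]
        refine List.sum_le_sum ?_
        intro x _
        simp [List.length_tail]
      have : r.tail.length < r.length := by
        cases r with
        | nil => simp at hr
        | cons a t => simp
      simp only [List.map_cons, List.sum_cons]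
      omega
    · have := ih h
      have : r.tail.length ≤ r.length := by cases r <;> simp
      simp only [List.map_cons, List.sum_cons]
      omega

def merge_header_rows_py_alt (rows : List (List String)) : List String :=
  if h : rows.any (fun r => !r.isEmpty) = true then
    let column := rows.map (fun row => row.headD "")
    let parts := (column.map cleanCell).filter (fun c => c ≠ "")
    PySem.Str.strip (PySem.Str.join " " parts) ::
      merge_header_rows_py_alt (rows.map (fun row => row.tail))
  else []
termination_by (rows.map List.length).sum
decreasing_by simpa using pv_sum_tail_lt rows h

-- ===== PRECONDITION & SPEC =====
def Spec_merge_header_rows_py (rows : List (List String)) (out : List String) : Prop := out = merge_header_rows_py_alt rows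
instance (rows : List (List String)) (out : List String) : Decidable (Spec_merge_header_rows_py rows out) := by unfold Spec_merge_header_rows_py; infer_instance

-- ===== CLAIM (what is proved, stated in full; the proofs are below) =====
def Claim_equal_merge_header_rows_py : Prop := ∀ (rows : List (List String)), Dom_merge_header_rows_py rows → Spec_merge_header_rows_py rows (merge_header_rows_py rows)

-- ===== LEMMAS AND PROOFS =====

-- the cell A reads at column `col` of a row
def pvCellAt (col : Nat) (row : List String) : String :=
  if col < row.length then row.getD col "" else ""

-- one merged output column, phrased over an arbitrary column index
def pvColOut (rows : List (List String)) (col : Nat) : String :=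
  PySem.Str.strip (PySem.Str.join " "
    (((rows.map (fun row => cleanCell (pvCellAt col row))).filter (fun c => c ≠ ""))))

-- foldr-max width of a table
def pvMw (rows : List (List String)) : Nat := (rows.map List.length).foldr max 0

theorem pv_foldl_clean (rows : List (List String)) (g : List String → String)
    (acc : List String) :
    rows.foldl (fun parts row =>
        if g row ≠ "" then parts ++ [g row] else parts) acc
      = acc ++ (rows.map g).filter (fun c => c ≠ "") := by
  induction rows generalizing acc with
  | nil => simp
  | cons r rs ih =>
    rw [List.foldl_cons]
    by_cases h : g r = ""
    · rw [ih]; simp [h]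
    · rw [ih]; simp [h]

theorem pv_foldl_max_nat (t : List Nat) (x : Nat) :
    t.foldl max x = max x (t.foldr max 0) := by
  induction t generalizing x with
  | nil => simp
  | cons y t ih =>
    simp only [List.foldl_cons, List.foldr_cons, ih]
    omega

theorem pv_Mw_all_nil (rows : List (List String))
    (h : ¬ rows.any (fun r => !r.isEmpty) = true) : pvMw rows = 0 := by
  induction rows with
  | nil => rfl
  | cons r rs ih =>
    simp only [List.any_cons, Bool.or_eq_true, not_or] at h
    have hr : r = [] := by cases r <;> simp_all
    have := ih h.2
    simp [pvMw, hr] at this ⊢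
    exact this

theorem pv_Mw_tail (rows : List (List String)) :
    pvMw (rows.map (fun row => row.tail)) = pvMw rows - 1 := by
  induction rows with
  | nil => rfl
  | cons r rs ih =>
    simp only [pvMw, List.map_cons, List.map_map, List.foldr_cons] at ih ⊢
    rw [List.length_tail, ih]
    have : 0 < (rs.map List.length).foldr max 0 ∨ (rs.map List.length).foldr max 0 = 0 := by omega
    omega

theorem pv_Mw_pos (rows : List (List String))
    (h : rows.any (fun r => !r.isEmpty) = true) : 1 ≤ pvMw rows := by
  induction rows with
  | nil => simp at h
  | cons r rs ih =>
    simp only [List.any_cons, Bool.or_eq_true] at h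
    simp only [pvMw, List.map_cons, List.foldr_cons]
    rcases h with h | h
    · have : r ≠ [] := by cases r <;> simp_all
      have : 1 ≤ r.length := by cases r <;> simp_all
      omega
    · have := ih h
      simp only [pvMw] at this
      omega

theorem pv_cellAt_zero (row : List String) : pvCellAt 0 row = row.headD "" := by
  cases row <;> simp [pvCellAt]

theorem pv_cellAt_succ (col : Nat) (row : List String) :
    pvCellAt (col + 1) row = pvCellAt col row.tail := by
  cases row with
  | nil => simp [pvCellAt]
  | cons a t => simp [pvCellAt]

theorem pv_colOut_succ (rows : List (List String)) (col : Nat) :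
    pvColOut rows (col + 1) = pvColOut (rows.map (fun row => row.tail)) col := by
  simp [pvColOut, List.map_map, Function.comp_def, pv_cellAt_succ]

-- main invariant: B's transposition produces exactly A's columns 0 .. width-1
set_option maxHeartbeats 1600000 in
theorem pv_main (rows : List (List String)) :
    merge_header_rows_py_alt rows
      = (List.range (pvMw rows)).map (fun col => pvColOut rows col) := by
  fun_induction merge_header_rows_py_alt rows with
  | case1 rows h ih =>
    have ih' : merge_header_rows_py_alt (rows.map (fun row => row.tail)) =
        (List.range (pvMw (rows.map (fun row => row.tail)))).map
          (fun col => pvColOut (rows.map (fun row => row.tail)) col) := by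
      simpa using ih
    have hm : pvMw rows = pvMw (rows.map (fun row => row.tail)) + 1 := by
      have h1 := pv_Mw_tail rows
      have h2 := pv_Mw_pos rows h
      omega
    rw [hm, List.range_succ_eq_map, List.map_cons, List.map_map]
    rw [ih']
    refine congrArg₂ List.cons ?_ ?_
    · simp [pvColOut, List.map_map, Function.comp_def, pv_cellAt_zero]
    · refine congrArg (fun f => List.map f (List.range (pvMw (rows.map (fun row => row.tail))))) ?_
      funext col
      simp only [Function.comp_apply]
      exact (pv_colOut_succ rows col).symm
  | case2 rows h =>
    rw [pv_Mw_all_nil rows h]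
    simp

theorem pv_width_eq (rows : List (List String)) (hne : ¬ rows.isEmpty = true) :
    (PySem.List.max? (rows.map (fun row => row.length)) (fun x => x)).getD 0 = pvMw rows := by
  cases rows with
  | nil => simp at hne
  | cons r rs =>
    rw [List.map_cons, PySem.List.max?_id_cons]
    simp only [Option.getD_some, pvMw, List.map_cons, List.foldr_cons]
    exact pv_foldl_max_nat _ _

-- ===== VERDICT (by name: the statement is the Claim_ definition above) =====
theorem merge_header_rows_py_spec : Claim_equal_merge_header_rows_py := by
  intro rows _
  unfold Spec_merge_header_rows_py merge_header_rows_py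
  by_cases hne : rows.isEmpty = true
  · have : rows = [] := by cases rows <;> simp_all
    subst this
    rw [pv_main]
    rfl
  · simp only [hne, pv_width_eq rows hne, pv_main rows]
    refine congrArg (fun f => List.map f (List.range (pvMw rows))) ?_
    funext col
    rw [pv_foldl_clean rows
      (fun row => cleanCell (if col < row.length then row.getD col "" else "")) []]
    simp [pvColOut, pvCellAt]
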